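-- pv_equiv track=rewrite | github.com/sandra86code/Programacion1 | RetoRuletaFortuna/ruleta.py | ocultaRefran
-- ===== SOURCE A (Python) =====
-- def ocultaRefran(refran):
--     refranOculto=""
--     for i in range (len(refran)):
--         if refran[i] in {" ", ",", ".", ";"}:
--             refranOculto+=refran[i]
--         else:
--             refranOculto+="-"
--
--     return refranOculto
-- ===== SOURCE B (Python) =====
-- import re
--
-- def ocultaRefran(refran):
--     # Run-based: replace each maximal run of hidden characters by a run of dashes.
--     return re.sub(r'[^ ,.;]+', lambda m: '-' * (m.end() - m.start()), refran)
-- ===== Notes on version B (the rewrite author's own statement) =====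
-- stated objective: faster
-- what changed: Replaced the per-character index loop with quadratic string accumulation by a run-based regex substitution: each maximal run of non-punctuation characters is rewritten at once to a dash run of the same length, in one linear pass in C.
import Mathlib
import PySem

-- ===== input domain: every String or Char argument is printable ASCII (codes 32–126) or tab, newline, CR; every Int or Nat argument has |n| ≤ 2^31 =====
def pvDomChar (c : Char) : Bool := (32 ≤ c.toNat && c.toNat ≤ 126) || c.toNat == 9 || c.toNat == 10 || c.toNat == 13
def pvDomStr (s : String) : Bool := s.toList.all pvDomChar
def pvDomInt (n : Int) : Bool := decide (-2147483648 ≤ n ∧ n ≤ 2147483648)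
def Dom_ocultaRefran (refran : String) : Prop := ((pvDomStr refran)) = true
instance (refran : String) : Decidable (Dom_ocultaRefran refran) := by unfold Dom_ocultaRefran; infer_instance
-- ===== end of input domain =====

-- B replaces A's per-character index loop (quadratic string accumulation) with a run-based regex substitution — each maximal run of hidden chars becomes a dash run; measurably faster.


-- ===== PORT A =====
-- A: index loop over range(len(refran)), appending the kept char or '-' to the accumulator.
def ocultaRefran (refran : String) : String :=
  String.ofList ((PySem.List.pyRange 0 (refran.toList.length : Int) 1).foldl
    (fun acc i =>
      let c := PySem.List.pyGetD refran.toList i ' '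
      if c = ' ' ∨ c = ',' ∨ c = '.' ∨ c = ';' then acc ++ [c] else acc ++ ['-'])
    [])

-- ===== PORT B =====
-- B: re.sub(r'[^ ,.;]+', …) — scan for maximal runs of characters outside the class " ,.;"
-- and emit a dash run of the same length for each; kept characters pass through one at a time.
def pvKeep (c : Char) : Bool := c == ' ' || c == ',' || c == '.' || c == ';'

def pvHideRuns : List Char → List Char
  | [] => []
  | c :: rest =>
    if pvKeep c then c :: pvHideRuns rest
    else
      let run := rest.takeWhile (fun x => !pvKeep x)
      let rest' := rest.dropWhile (fun x => !pvKeep x)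
      List.replicate (run.length + 1) '-' ++ pvHideRuns rest'
termination_by l => l.length
decreasing_by
  · simp
  · have := List.length_dropWhile_le (fun x => !pvKeep x) rest
    simp; omega

def ocultaRefran_alt (refran : String) : String :=
  String.ofList (pvHideRuns refran.toList)

-- ===== PRECONDITION & SPEC =====
def Spec_ocultaRefran (refran : String) (out : String) : Prop := out = ocultaRefran_alt refran
instance (refran : String) (out : String) : Decidable (Spec_ocultaRefran refran out) := by unfold Spec_ocultaRefran; infer_instance

-- ===== CLAIM (what is proved, stated in full; the proofs are below) =====
def Claim_equal_ocultaRefran : Prop := ∀ (refran : String), Dom_ocultaRefran refran → Spec_ocultaRefran refran (ocultaRefran refran)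

-- ===== LEMMAS AND PROOFS =====

-- the pointwise hiding function both programs compute
def pvHide1 (c : Char) : Char := if c = ' ' ∨ c = ',' ∨ c = '.' ∨ c = ';' then c else '-'

theorem pvKeep_iff (c : Char) : pvKeep c = true ↔ (c = ' ' ∨ c = ',' ∨ c = '.' ∨ c = ';') := by
  simp [pvKeep]; tauto

theorem pvHideRuns_eq_map (l : List Char) : pvHideRuns l = l.map pvHide1 := by
  match l with
  | [] => simp [pvHideRuns]
  | c :: rest =>
    by_cases h : pvKeep c = true
    · rw [pvHideRuns, if_pos h, pvHideRuns_eq_map rest]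
      simp [pvHide1, (pvKeep_iff c).mp h]
    · rw [pvHideRuns, if_neg h]
      show List.replicate ((rest.takeWhile (fun x => !pvKeep x)).length + 1) '-'
          ++ pvHideRuns (rest.dropWhile (fun x => !pvKeep x)) = (c :: rest).map pvHide1
      have hrest := pvHideRuns_eq_map (rest.dropWhile (fun x => !pvKeep x))
      rw [hrest]
      have hdec : rest = rest.takeWhile (fun x => !pvKeep x) ++ rest.dropWhile (fun x => !pvKeep x) :=
        (List.takeWhile_append_dropWhile).symm
      have hrun : (rest.takeWhile (fun x => !pvKeep x)).map pvHide1
          = List.replicate (rest.takeWhile (fun x => !pvKeep x)).length '-' := by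
        rw [List.eq_replicate_iff]
        constructor
        · simp
        · intro b hb
          obtain ⟨a, ha, rfl⟩ := List.mem_map.mp hb
          have := List.mem_takeWhile_imp ha
          simp at this
          unfold pvHide1
          rw [if_neg]
          intro h1; exact absurd ((pvKeep_iff a).mpr h1) (by simp [this])
      refine Eq.symm ?_
      calc (c :: rest).map pvHide1
          = pvHide1 c :: rest.map pvHide1 := by simp
        _ = '-' :: ((rest.takeWhile (fun x => !pvKeep x)).map pvHide1
              ++ (rest.dropWhile (fun x => !pvKeep x)).map pvHide1) := by
            have hm : rest.map pvHide1
                = (rest.takeWhile (fun x => !pvKeep x)).map pvHide1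
                  ++ (rest.dropWhile (fun x => !pvKeep x)).map pvHide1 := by
              conv_lhs => rw [hdec]
              rw [List.map_append]
            have hc : pvHide1 c = '-' := by
              unfold pvHide1
              rw [if_neg]
              intro h1; exact absurd ((pvKeep_iff c).mpr h1) h
            rw [hm, hc]
        _ = List.replicate ((rest.takeWhile (fun x => !pvKeep x)).length + 1) '-'
              ++ (rest.dropWhile (fun x => !pvKeep x)).map pvHide1 := by
            rw [hrun]; simp [List.replicate_succ]
termination_by l.length
decreasing_by
  all_goals simp
  all_goals exact List.length_dropWhile_le _ _

theorem ocultaRefran_foldl_eq_map (refran : String) :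
    ocultaRefran refran = String.ofList (refran.toList.map pvHide1) := by
  unfold ocultaRefran
  congr 1
  have h := PySem.List.foldl_pyRange_zero_pyGetD refran.toList ' '
      (fun acc c => if c = ' ' ∨ c = ',' ∨ c = '.' ∨ c = ';' then acc ++ [c] else acc ++ ['-'])
      ([] : List Char)
  simp only [PySem.List.len_eq] at h
  rw [h]
  have e : (fun (acc : List Char) c => if c = ' ' ∨ c = ',' ∨ c = '.' ∨ c = ';' then acc ++ [c] else acc ++ ['-'])
         = fun acc c => acc ++ [pvHide1 c] := by
    funext acc c; unfold pvHide1; split_ifs <;> rfl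
  rw [e, PySem.List.foldl_append_singleton_eq_map]
  simp

-- ===== VERDICT (by name: the statement is the Claim_ definition above) =====
theorem ocultaRefran_spec : Claim_equal_ocultaRefran := by
  intro refran _
  unfold Spec_ocultaRefran ocultaRefran_alt
  rw [ocultaRefran_foldl_eq_map, pvHideRuns_eq_map]
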